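-- pv_equiv track=rewrite | github.com/jfitz33/space-mambot | cogs/tournaments.py | _parse_ydk
-- ===== SOURCE A (Python) =====
-- from collections import Counter
--
-- def _normalize_card_id(value: str | int | None) -> str | None:
--     if value is None:
--         return None
--     text = str(value).strip()
--     if not text:
--         return None
--     if text.isdigit():
--         try:
--             return str(int(text))
--         except ValueError:
--             return None
--     return text.lower()
--
-- def _parse_ydk(
--     text: str,
-- ) -> tuple[Counter[str], list[str], dict[str, list[str]]]:
--     counts: Counter[str] = Counter()
--     invalid: list[str] = []
--     sections: dict[str, list[str]] = {"main": [], "extra": [], "side": []}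
--
--     current_section = "main"
--
--     markers = {
--         "#main": "main",
--         "#extra": "extra",
--         "#side": "side",
--         "!side": "side",
--     }
--
--     for raw_line in text.splitlines():
--         line = raw_line.strip()
--         if not line:
--             continue
--
--         lower_line = line.lower()
--         if lower_line in markers:
--             current_section = markers[lower_line]
--             continue
--
--         if line.startswith("#") or line.startswith("!"):
--             # Ignore any other metadata markers
--             continue
--
--         cid = _normalize_card_id(line)
--         if not cid:
--             invalid.append(line)
--             continue
--
--         counts[cid] += 1
--         sections.setdefault(current_section, []).append(cid)
--
--     return counts, invalid, sections
-- ===== SOURCE B (Python) =====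
-- from collections import Counter
--
-- def _normalize_card_id(value):
--     if value is None:
--         return None
--     text = str(value).strip()
--     if not text:
--         return None
--     if text.isdigit():
--         try:
--             return str(int(text))
--         except ValueError:
--             return None
--     return text.lower()
--
-- _MARKERS = {"#main": "main", "#extra": "extra", "#side": "side", "!side": "side"}
--
-- def _parse_ydk(text):
--     # Phase 1: a single state-machine pass that only TAGS each content line
--     # with the section in effect; nothing is normalized or counted here.
--     tagged = []
--     section = "main"
--     for raw in text.splitlines():
--         line = raw.strip()
--         if not line:
--             continue
--         low = line.lower()
--         if low in _MARKERS:
--             section = _MARKERS[low]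
--         elif line[0] not in "#!":
--             tagged.append((section, line))
--     # Phase 2: derive each output independently from the tagged list.
--     invalid = [ln for _, ln in tagged if _normalize_card_id(ln) is None]
--     sections = {
--         s: [cid for sec, ln in tagged if sec == s
--             for cid in [_normalize_card_id(ln)] if cid is not None]
--         for s in ("main", "extra", "side")
--     }
--     counts = Counter(cid for _, ln in tagged
--                      for cid in [_normalize_card_id(ln)] if cid is not None)
--     return counts, invalid, sections
-- ===== Notes on version B (the rewrite author's own statement) =====
-- stated objective: alternative
-- what changed: B replaces A's single loop that counts, validates and appends in-place with a two-phase decomposition: a state-machine pass that only tags each content line with its section, then three independent derivation passes (invalid list, per-section normalized lists, Counter) over the tagged lines.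
import Mathlib
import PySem

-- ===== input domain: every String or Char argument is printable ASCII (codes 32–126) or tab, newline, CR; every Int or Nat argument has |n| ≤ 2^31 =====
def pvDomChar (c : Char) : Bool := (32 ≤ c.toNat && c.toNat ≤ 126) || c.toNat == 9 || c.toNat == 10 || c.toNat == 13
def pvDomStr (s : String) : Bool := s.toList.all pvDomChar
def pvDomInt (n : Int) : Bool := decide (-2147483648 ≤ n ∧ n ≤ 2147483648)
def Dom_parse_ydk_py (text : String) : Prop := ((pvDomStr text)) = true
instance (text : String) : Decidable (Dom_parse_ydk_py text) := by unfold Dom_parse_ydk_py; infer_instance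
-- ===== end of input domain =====

-- B re-decomposes A's single counting/appending loop into a tagging pass plus three
-- independent derivation passes; return values are identical (objective: alternative).

-- ===== PORT A =====
-- shared helper: _normalize_card_id (identical in both Pythons), specialised to str input
def pvNormalizeCid (value : String) : Option String :=
  let text := PySem.Str.strip value
  if text = "" then none
  else if PySem.Str.strIsdigit text then
    match PySem.Int.ofStr? text with
    | some n => some (PySem.Int.toStr n)
    | none => none
  else some (PySem.Str.lower text)

-- the markers dict (literal, shared: both Pythons use the same 4-entry dict)
def pvMarker? (low : String) : Option String :=
  if low = "#main" then some "main"
  else if low = "#extra" then some "extra"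
  else if low = "#side" then some "side"
  else if low = "!side" then some "side"
  else none

-- A's loop body over state (counts, invalid, sections, current_section)
def parseStepA
    (st : PySem.Dict String Int × List String × PySem.Dict String (List String) × String)
    (raw : String) :
    PySem.Dict String Int × List String × PySem.Dict String (List String) × String :=
  let (counts, invalid, sections, cur) := st
  let line := PySem.Str.strip raw
  if line = "" then (counts, invalid, sections, cur)
  else
    let low := PySem.Str.lower line
    match pvMarker? low with
    | some s => (counts, invalid, sections, s)
    | none =>
      if PySem.Str.startswith line "#" || PySem.Str.startswith line "!" then
        (counts, invalid, sections, cur)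
      else
        match pvNormalizeCid line with
        | none => (counts, invalid ++ [line], sections, cur)
        | some cid =>
          -- counts[cid] += 1 ; sections.setdefault(cur, []).append(cid)
          (counts.modify cid 0 (· + 1), invalid,
           (sections.setdefault cur []).modify cur [] (· ++ [cid]), cur)

def parse_ydk_py (text : String) :
    (List (String × Int)) × List String × (List (String × List String)) :=
  let init : PySem.Dict String Int × List String × PySem.Dict String (List String) × String :=
    (PySem.Dict.empty, [],
     PySem.Dict.ofList [("main", []), ("extra", []), ("side", [])], "main")
  let res := (PySem.Str.splitlines text).foldl parseStepA init
  (res.1.items, res.2.1, res.2.2.1.items)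

-- ===== PORT B =====
-- phase-1 loop body: tag each content line with the section in effect
def tagStep (st : List (String × String) × String) (raw : String) :
    List (String × String) × String :=
  let (tagged, sect) := st
  let line := PySem.Str.strip raw
  if line = "" then (tagged, sect)
  else
    match pvMarker? (PySem.Str.lower line) with
    | some s => (tagged, s)
    | none =>
      -- elif line[0] not in "#!": tagged.append((section, line))
      match PySem.Str.pyGet? line 0 with
      | some c => if c == '#' || c == '!' then (tagged, sect)
                  else (tagged ++ [(sect, line)], sect)
      | none => (tagged, sect)   -- unreachable: line ≠ ""

def parse_ydk_py_alt (text : String) :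
    (List (String × Int)) × List String × (List (String × List String)) :=
  let tagged := ((PySem.Str.splitlines text).foldl tagStep ([], "main")).1
  let invalid := (tagged.filter (fun p => (pvNormalizeCid p.2).isNone)).map (·.2)
  let secList := fun (s : String) =>
    tagged.filterMap (fun p => if p.1 = s then pvNormalizeCid p.2 else none)
  let sections := [("main", secList "main"), ("extra", secList "extra"), ("side", secList "side")]
  let counts := PySem.Dict.counter (tagged.filterMap (fun p => pvNormalizeCid p.2))
  (counts.items, invalid, sections)

-- ===== PRECONDITION & SPEC =====
def Spec_parse_ydk_py (text : String) (out : (List (String × Int)) × List String × (List (String × List String))) : Prop := out = parse_ydk_py_alt text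
instance (text : String) (out : (List (String × Int)) × List String × (List (String × List String))) : Decidable (Spec_parse_ydk_py text out) := by unfold Spec_parse_ydk_py; infer_instance

-- ===== CLAIM (what is proved, stated in full; the proofs are below) =====
def Claim_equal_parse_ydk_py : Prop := ∀ (text : String), Dom_parse_ydk_py text → Spec_parse_ydk_py text (parse_ydk_py text)

-- ===== LEMMAS AND PROOFS =====

-- B's derived views of a tagged prefix (proof-only abbreviations)
def pvCids (tagged : List (String × String)) : List String :=
  tagged.filterMap (fun p => pvNormalizeCid p.2)

def pvInval (tagged : List (String × String)) : List String :=
  (tagged.filter (fun p => (pvNormalizeCid p.2).isNone)).map (·.2)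

def pvSl (tagged : List (String × String)) (s : String) : List String :=
  tagged.filterMap (fun p => if p.1 = s then pvNormalizeCid p.2 else none)

def pvSecDict (tagged : List (String × String)) : PySem.Dict String (List String) :=
  PySem.Dict.ofList [("main", pvSl tagged "main"), ("extra", pvSl tagged "extra"), ("side", pvSl tagged "side")]

def pvStateOf (tc : List (String × String) × String) :
    PySem.Dict String Int × List String × PySem.Dict String (List String) × String :=
  (PySem.Dict.counter (pvCids tc.1), pvInval tc.1, pvSecDict tc.1, tc.2)

def pvCurOK (cur : String) : Prop := cur = "main" ∨ cur = "extra" ∨ cur = "side"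

lemma pvMarker?_ok (low s : String) (h : pvMarker? low = some s) : pvCurOK s := by
  unfold pvMarker? at h
  split_ifs at h <;> simp_all [pvCurOK]

lemma tagStep_curOK (st : List (String × String) × String) (raw : String)
    (h : pvCurOK st.2) : pvCurOK (tagStep st raw).2 := by
  obtain ⟨tagged, cur⟩ := st
  unfold tagStep
  simp only
  split_ifs with h1
  · exact h
  · rcases hm : pvMarker? (PySem.Str.lower (PySem.Str.strip raw)) with _ | s
    · rcases hg : PySem.Str.pyGet? (PySem.Str.strip raw) 0 with _ | c
      · exact h
      · dsimp only
        split_ifs <;> exact h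
    · exact pvMarker?_ok _ _ hm

lemma parseStepA_eq (tagged : List (String × String)) (cur : String) (raw : String)
    (h : pvCurOK cur) :
    parseStepA (pvStateOf (tagged, cur)) raw = pvStateOf (tagStep (tagged, cur) raw) := by
  unfold parseStepA tagStep pvStateOf
  dsimp only
  by_cases h1 : PySem.Str.strip raw = ""
  · simp only [if_pos h1]
  · simp only [if_neg h1]
    rcases hm : pvMarker? (PySem.Str.lower (PySem.Str.strip raw)) with _ | s
    · dsimp only
      obtain ⟨c, rest, hcs⟩ : ∃ c rest, (PySem.Str.strip raw).toList = c :: rest := by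
        cases hh : (PySem.Str.strip raw).toList with
        | nil =>
          exact absurd (by rw [← String.ofList_toList (s := PySem.Str.strip raw), hh]) h1
        | cons c rest => exact ⟨c, rest, rfl⟩
      have hget : PySem.Str.pyGet? (PySem.Str.strip raw) 0 = some c := by
        simp [PySem.Str.pyGet?, hcs, PySem.List.pyGet?, PySem.List.pyIdx?]
      have hsw1 : PySem.Str.startswith (PySem.Str.strip raw) "#" = (c == '#') := by
        simp [PySem.Str.startswith, hcs, PySem.Chars.startswith, List.isPrefixOf, BEq.comm]
      have hsw2 : PySem.Str.startswith (PySem.Str.strip raw) "!" = (c == '!') := by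
        simp [PySem.Str.startswith, hcs, PySem.Chars.startswith, List.isPrefixOf, BEq.comm]
      rw [hget, hsw1, hsw2]
      by_cases hc : (c == '#' || c == '!') = true
      · simp only [if_pos hc]
      · simp only [if_neg hc]
        rcases hn : pvNormalizeCid (PySem.Str.strip raw) with _ | cid
        · dsimp only
          have hc1 : pvCids (tagged ++ [(cur, PySem.Str.strip raw)]) = pvCids tagged := by
            simp [pvCids, List.filterMap_append, hn]
          have hc2 : pvInval (tagged ++ [(cur, PySem.Str.strip raw)]) = pvInval tagged ++ [PySem.Str.strip raw] := by
            simp [pvInval, List.filter_append, List.filter, hn]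
          have hc3 : pvSecDict (tagged ++ [(cur, PySem.Str.strip raw)]) = pvSecDict tagged := by
            unfold pvSecDict pvSl
            simp [List.filterMap_append, hn]
          rw [hc1, hc2, hc3]
        · dsimp only
          have hc1 : pvCids (tagged ++ [(cur, PySem.Str.strip raw)]) = pvCids tagged ++ [cid] := by
            simp [pvCids, List.filterMap_append, hn]
          have hc2 : pvInval (tagged ++ [(cur, PySem.Str.strip raw)]) = pvInval tagged := by
            simp [pvInval, List.filter_append, List.filter, hn]
          have hc3 : ∀ s, pvSl (tagged ++ [(cur, PySem.Str.strip raw)]) s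
              = pvSl tagged s ++ (if cur = s then [cid] else []) := by
            intro s
            unfold pvSl
            rw [List.filterMap_append]
            split_ifs with hs <;> simp [hs, hn]
          rw [hc1, hc2, PySem.Dict.counter_append_singleton]
          unfold pvSecDict
          rw [hc3 "main", hc3 "extra", hc3 "side"]
          rcases h with h | h | h <;> subst h <;> simp <;> rfl
    · dsimp only

lemma parse_loop (lines : List String) :
    ∀ (tc : List (String × String) × String), pvCurOK tc.2 →
    lines.foldl parseStepA (pvStateOf tc) = pvStateOf (lines.foldl tagStep tc) := by
  induction lines with
  | nil => intro tc _; rfl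
  | cons raw rest ih =>
    intro tc h
    obtain ⟨tagged, cur⟩ := tc
    simp only [List.foldl_cons, parseStepA_eq tagged cur raw h]
    exact ih _ (tagStep_curOK (tagged, cur) raw h)

-- ===== VERDICT (by name: the statement is the Claim_ definition above) =====
theorem parse_ydk_py_spec : Claim_equal_parse_ydk_py := by
  intro text _
  have key : List.foldl parseStepA
      (PySem.Dict.empty, ([] : List String),
       PySem.Dict.ofList [("main", ([] : List String)), ("extra", []), ("side", [])], "main")
      (PySem.Str.splitlines text)
      = pvStateOf (List.foldl tagStep ([], "main") (PySem.Str.splitlines text)) :=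
    parse_loop _ ([], "main") (Or.inl rfl)
  unfold Spec_parse_ydk_py parse_ydk_py parse_ydk_py_alt
  simp only [key, pvStateOf, pvCids, pvInval, pvSecDict, pvSl]
  rfl
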